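-- pv_equiv track=rewrite | github.com/EarthenSky/LD44-practice | map_designer.py | cut_colour_code
-- ===== SOURCE A (Python) =====
-- COLOUR_BLACK = (0, 0, 0)
--
-- COLOUR_WHITE = (255, 255, 255)
--
-- COLOUR_GRAY = (157, 157, 157)
--
-- COLOUR_SEB = (0, 87, 132)
--
-- COLOUR_CB = (178, 220, 239)
--
-- COLOUR_O = (235, 137, 49)
--
-- COLOUR_Y = (247, 226, 107)
--
-- COLOUR_R = (190, 38, 51)
--
-- COLOUR_G = (68, 137, 26)
--
-- COLOUR_LG = (163, 206, 39)
--
-- def cut_colour_code(string):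
--     if string.find('~') == -1:
--         return (string, COLOUR_SEB)  # return default colour
--     else:
--         state = "main"
--         save_string = ""
--         for ch in string:
--             if state == "save" and ch == '~':
--                 colour = COLOUR_BLACK
--                 ss = save_string.lower()
--                 if ss == "white": colour = COLOUR_WHITE
--                 elif ss == "grey" or ss == "gray": colour = COLOUR_GRAY
--                 elif ss == "red": colour = COLOUR_R
--                 elif ss == "blue": colour = COLOUR_SEB
--                 elif ss == "yellow": colour = COLOUR_Y
--                 elif ss == "orange": colour = COLOUR_O
--                 elif ss == "green": colour = COLOUR_G
--                 elif ss == "lg": colour = COLOUR_LG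
--                 elif ss == "cb": colour = COLOUR_CB
--                 return (string.replace('~{}~'.format(save_string),''), colour)
--             elif state == "main" and ch == '~':
--                 state = "save"
--             elif state == "save":
--                 save_string += ch
-- ===== SOURCE B (Python) =====
-- COLOUR_BLACK = (0, 0, 0)
-- COLOUR_WHITE = (255, 255, 255)
-- COLOUR_GRAY = (157, 157, 157)
-- COLOUR_SEB = (0, 87, 132)
-- COLOUR_CB = (178, 220, 239)
-- COLOUR_O = (235, 137, 49)
-- COLOUR_Y = (247, 226, 107)
-- COLOUR_R = (190, 38, 51)
-- COLOUR_G = (68, 137, 26)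
-- COLOUR_LG = (163, 206, 39)
--
-- COLOURS = {
--     "white": COLOUR_WHITE,
--     "grey": COLOUR_GRAY,
--     "gray": COLOUR_GRAY,
--     "red": COLOUR_R,
--     "blue": COLOUR_SEB,
--     "yellow": COLOUR_Y,
--     "orange": COLOUR_O,
--     "green": COLOUR_G,
--     "lg": COLOUR_LG,
--     "cb": COLOUR_CB,
-- }
--
-- def cut_colour_code(string):
--     i = string.find('~')
--     if i == -1:
--         return (string, COLOUR_SEB)  # return default colour
--     j = string.find('~', i + 1)
--     if j == -1:
--         return None  # unterminated colour code
--     token = string[i + 1:j]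
--     colour = COLOURS.get(token.lower(), COLOUR_BLACK)
--     return (string.replace('~' + token + '~', ''), colour)
-- ===== Notes on version B (the rewrite author's own statement) =====
-- stated objective: simpler
-- what changed: Replaced the char-by-char state machine with direct delimiter indexing: find the first '~' and the next '~', slice the token out, and map token.lower() through a colour dict with BLACK default.
-- outside the precondition, e.g. on cut_colour_code('~'): A returns None, B returns None
import Mathlib
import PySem

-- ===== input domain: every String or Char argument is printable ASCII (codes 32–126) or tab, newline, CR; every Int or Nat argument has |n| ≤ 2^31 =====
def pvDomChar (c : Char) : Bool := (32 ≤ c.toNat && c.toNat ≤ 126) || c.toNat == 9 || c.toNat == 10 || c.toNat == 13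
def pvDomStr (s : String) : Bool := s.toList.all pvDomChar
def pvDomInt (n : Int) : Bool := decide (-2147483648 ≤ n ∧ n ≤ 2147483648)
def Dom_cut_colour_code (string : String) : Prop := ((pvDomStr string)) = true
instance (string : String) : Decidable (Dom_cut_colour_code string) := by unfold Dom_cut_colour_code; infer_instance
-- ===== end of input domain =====

-- B replaces A's char-by-char state machine by direct delimiter indexing (find both '~',
-- slice the token, dictionary lookup); objective: simpler. Equivalence is on the return value.

-- ===== PORT A =====
-- the if/elif colour chain of A, on the lowered save_string
def pvColourChainA (ss : List Char) : Int × Int × Int :=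
  if ss = "white".toList then (255, 255, 255)
  else if ss = "grey".toList ∨ ss = "gray".toList then (157, 157, 157)
  else if ss = "red".toList then (190, 38, 51)
  else if ss = "blue".toList then (0, 87, 132)
  else if ss = "yellow".toList then (247, 226, 107)
  else if ss = "orange".toList then (235, 137, 49)
  else if ss = "green".toList then (68, 137, 26)
  else if ss = "lg".toList then (163, 206, 39)
  else if ss = "cb".toList then (178, 220, 239)
  else (0, 0, 0)

-- A's for-loop: state "save" is the Bool `saving`; on fall-through Python returns None
-- (those inputs — exactly one '~' — are excluded by Pre_), ported as a dummy value.
def cutLoopA (string : String) : List Char → Bool → List Char → String × (Int × Int × Int)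
  | [], _, _ => ("", (0, 0, 0))
  | ch :: rest, saving, save_string =>
    if saving ∧ ch = '~' then
      (PySem.Str.replace string (String.ofList ('~' :: save_string ++ ['~'])) "",
       pvColourChainA (PySem.Chars.lower save_string))
    else if ¬ saving ∧ ch = '~' then cutLoopA string rest true save_string
    else if saving then cutLoopA string rest saving (save_string ++ [ch])
    else cutLoopA string rest saving save_string

def cut_colour_code (string : String) : String × (Int × Int × Int) :=
  if PySem.Str.find string "~" = -1 then (string, (0, 87, 132))
  else cutLoopA string string.toList false []

-- ===== PORT B =====
def pvColourTable : PySem.Dict String (Int × Int × Int) :=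
  PySem.Dict.ofList
    [("white", (255, 255, 255)), ("grey", (157, 157, 157)), ("gray", (157, 157, 157)),
     ("red", (190, 38, 51)), ("blue", (0, 87, 132)), ("yellow", (247, 226, 107)),
     ("orange", (235, 137, 49)), ("green", (68, 137, 26)), ("lg", (163, 206, 39)),
     ("cb", (178, 220, 239))]

-- on j = -1 (exactly one '~') Python B returns None, excluded by Pre_; ported as a dummy value
def cut_colour_code_alt (string : String) : String × (Int × Int × Int) :=
  let i := PySem.Str.find string "~"
  if i = -1 then (string, (0, 87, 132))
  else
    let j := PySem.Str.findFrom string "~" (i + 1)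
    if j = -1 then ("", (0, 0, 0))
    else
      let token := PySem.Str.slice string (some (i + 1)) (some j)
      let colour := PySem.Dict.getD pvColourTable (PySem.Str.lower token) (0, 0, 0)
      (PySem.Str.replace string ("~" ++ token ++ "~") "", colour)

-- ===== PRECONDITION & SPEC =====
-- Pre_ excludes strings containing exactly one '~': there A's loop falls through and
-- returns None, which is not a value of the declared tuple type (Python B returns None too).
def Pre_cut_colour_code (string : String) : Prop := string.toList.count '~' ≠ 1
instance (string : String) : Decidable (Pre_cut_colour_code string) := by
  unfold Pre_cut_colour_code; infer_instance

def pvWitness_cut_colour_code : String := "a ~red~ b"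

def Spec_cut_colour_code (string : String) (out : String × (Int × Int × Int)) : Prop :=
  out = cut_colour_code_alt string
instance (string : String) (out : String × (Int × Int × Int)) : Decidable (Spec_cut_colour_code string out) := by
  unfold Spec_cut_colour_code; infer_instance

-- ===== CLAIM (what is proved, stated in full; the proofs are below) =====
def Claim_equal_cut_colour_code : Prop :=
  ∀ (string : String), Dom_cut_colour_code string → Pre_cut_colour_code string →
    Spec_cut_colour_code string (cut_colour_code string)

-- ===== LEMMAS AND PROOFS =====

-- [a] is a prefix of l iff l starts with a
theorem pv_singleton_prefix {a : Char} {l : List Char} : [a] <+: l ↔ ∃ t, l = a :: t := by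
  constructor
  · rintro ⟨t, rfl⟩; exact ⟨t, rfl⟩
  · rintro ⟨t, rfl⟩; exact ⟨t, rfl⟩

-- [a] is an infix of l iff a ∈ l
theorem pv_singleton_infix {a : Char} {l : List Char} : [a] <:+: l ↔ a ∈ l := by
  constructor
  · intro h; exact h.subset (by simp)
  · intro h
    obtain ⟨p, q, rfl⟩ := List.append_of_mem h
    exact ⟨p, q, by simp⟩

-- Chars.find on a single character points at its first occurrence
theorem pv_find_first {a : Char} (p q : List Char) (hp : a ∉ p) :
    PySem.Chars.find (p ++ a :: q) [a] = (p.length : Int) := by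
  have hinf : [a] <:+: (p ++ a :: q) := pv_singleton_infix.mpr (by simp)
  have hne := (PySem.Chars.find_ne_neg_one_iff (p ++ a :: q) [a]).mpr hinf
  have hge : 0 ≤ PySem.Chars.find (p ++ a :: q) [a] := by
    have := PySem.Chars.neg_one_le_find (p ++ a :: q) [a]
    omega
  obtain ⟨hpre, hmin⟩ := PySem.Chars.find_spec (s := p ++ a :: q) (sub := [a]) hge
  set n := (PySem.Chars.find (p ++ a :: q) [a]).toNat with hn
  have hcases : n = p.length := by
    rcases lt_trichotomy n p.length with h | h | h
    · -- the character at position n < p.length would be a, contradicting a ∉ p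
      obtain ⟨t', ht⟩ := pv_singleton_prefix.mp hpre
      have h0 : ((p ++ a :: q).drop n)[0]? = some a := by rw [ht]; rfl
      rw [List.getElem?_drop] at h0
      simp only [Nat.add_zero] at h0
      rw [List.getElem?_append_left h] at h0
      exact absurd (List.mem_of_getElem? h0) hp
    · exact h
    · have hdrop : (p ++ a :: q).drop p.length = a :: q := by simp
      exact absurd (by rw [hdrop]; exact ⟨q, rfl⟩) (hmin p.length h)
  omega

-- A's loop skips the prefix before the first '~' in main state
theorem pv_loopA_skip (string : String) (p : List Char) (hp : '~' ∉ p) :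
    ∀ (q acc : List Char),
      cutLoopA string (p ++ q) false acc = cutLoopA string q false acc := by
  induction p with
  | nil => intro q acc; rfl
  | cons c cs ih =>
    intro q acc
    have hc : c ≠ '~' := fun h => hp (by simp [h])
    show cutLoopA string (c :: (cs ++ q)) false acc = _
    rw [cutLoopA]
    rw [if_neg (by simp [hc]), if_neg (by simp [hc]), if_neg (by simp)]
    exact ih (fun h => hp (List.mem_cons_of_mem _ h)) q acc

-- A's loop in save state accumulates up to the closing '~'
theorem pv_loopA_save (string : String) (r : List Char) (hr : '~' ∉ r) :
    ∀ (t acc : List Char),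
      cutLoopA string (r ++ '~' :: t) true acc =
        (PySem.Str.replace string (String.ofList ('~' :: (acc ++ r) ++ ['~'])) "",
         pvColourChainA (PySem.Chars.lower (acc ++ r))) := by
  induction r with
  | nil =>
    intro t acc
    show cutLoopA string ('~' :: t) true acc = _
    rw [cutLoopA, if_pos (by simp)]
    simp
  | cons c cs ih =>
    intro t acc
    have hc : c ≠ '~' := fun h => hr (by simp [h])
    show cutLoopA string (c :: (cs ++ '~' :: t)) true acc = _
    rw [cutLoopA]
    rw [if_neg (by simp [hc]), if_neg (by simp), if_pos rfl]
    rw [ih (fun h => hr (List.mem_cons_of_mem _ h)) t (acc ++ [c])]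
    simp

-- the if/elif colour chain agrees with the dictionary lookup
theorem pv_chain_eq_dict (s : String) :
    PySem.Dict.getD pvColourTable s (0, 0, 0) = pvColourChainA s.toList := by
  have hmk : pvColourTable = PySem.Dict.mk
      [("white", (255, 255, 255)), ("grey", (157, 157, 157)), ("gray", (157, 157, 157)),
       ("red", (190, 38, 51)), ("blue", (0, 87, 132)), ("yellow", (247, 226, 107)),
       ("orange", (235, 137, 49)), ("green", (68, 137, 26)), ("lg", (163, 206, 39)),
       ("cb", (178, 220, 239))] := by decide
  have hinj : ∀ t : String, (s.toList = t.toList) = (s = t) :=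
    fun t => propext ⟨fun h => String.ext h, fun h => by rw [h]⟩
  rw [hmk]
  unfold pvColourChainA
  simp only [hinj]
  simp only [PySem.Dict.getD, PySem.Dict.get?_mk_cons, beq_iff_eq]
  by_cases h1 : s = "white"
  · simp_all
  by_cases h2 : s = "grey"
  · simp_all
  by_cases h3 : s = "gray"
  · simp_all
  by_cases h4 : s = "red"
  · simp_all
  by_cases h5 : s = "blue"
  · simp_all
  by_cases h6 : s = "yellow"
  · simp_all
  by_cases h7 : s = "orange"
  · simp_all
  by_cases h8 : s = "green"
  · simp_all
  by_cases h9 : s = "lg"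
  · simp_all
  by_cases h10 : s = "cb"
  · simp_all
  simp_all [PySem.Dict.get?, eq_comm]

-- split a list at the first occurrence of a character
theorem pv_split_first {a : Char} {l : List Char} (h : a ∈ l) :
    ∃ p q, l = p ++ a :: q ∧ a ∉ p := by
  induction l with
  | nil => cases h
  | cons c cs ih =>
    by_cases hc : c = a
    · exact ⟨[], cs, by simp [hc], by simp⟩
    · have hm : a ∈ cs := by
        rcases List.mem_cons.mp h with h' | h'
        · exact absurd h'.symm hc
        · exact h'
      obtain ⟨p, q, rfl, hp⟩ := ih hm
      exact ⟨c :: p, q, by simp, by simp [hp, Ne.symm hc]⟩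

-- ===== VERDICT (by name: the statement is the Claim_ definition above) =====
theorem cut_colour_code_spec : Claim_equal_cut_colour_code := by
  intro string _hdom hpre
  unfold Spec_cut_colour_code
  unfold Pre_cut_colour_code at hpre
  have hsub : ("~" : String).toList = ['~'] := rfl
  by_cases h0 : '~' ∈ string.toList
  · -- at least two '~'
    have hc2 : 2 ≤ string.toList.count '~' := by
      have h1 := List.count_pos_iff.mpr h0
      omega
    obtain ⟨p, q, hpq, hp⟩ := pv_split_first h0
    have hq : '~' ∈ q := by
      by_contra hq
      have hcount : (p ++ '~' :: q).count '~' = 1 := by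
        rw [List.count_append, List.count_cons]
        rw [List.count_eq_zero.mpr hp, List.count_eq_zero.mpr hq]
        simp
      rw [hpq, hcount] at hc2
      omega
    obtain ⟨r, t, hrt, hr⟩ := pv_split_first hq
    subst hrt
    have hfind : PySem.Str.find string "~" = (p.length : Int) := by
      rw [PySem.Str.find_eq, hsub, hpq]
      exact pv_find_first p _ hp
    have hdropA : (p ++ '~' :: (r ++ '~' :: t)).drop (p.length + 1) = r ++ '~' :: t := by
      simp [List.drop_append]
    have hfind2 : PySem.Chars.find (string.toList.drop (p.length + 1)) ['~'] = (r.length : Int) := by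
      rw [hpq, hdropA]
      exact pv_find_first r t hr
    have hlen : p.length + 1 ≤ string.toList.length := by
      rw [hpq]; simp
    have hfrom : PySem.Str.findFrom string "~" ((p.length : Int) + 1) none
        = ((p.length : Int) + 1 + r.length) := by
      have hk : ((p.length + 1 : Nat) : Int) = (p.length : Int) + 1 := by push_cast; ring
      rw [PySem.Str.findFrom_eq, hsub, ← hk,
          PySem.Chars.findFrom_natCast _ _ _ hlen, hfind2, if_neg (by omega)]
    -- evaluate port A
    unfold cut_colour_code
    rw [hfind, if_neg (by omega), hpq,
        pv_loopA_skip string p hp ('~' :: (r ++ '~' :: t)) []]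
    rw [show cutLoopA string ('~' :: (r ++ '~' :: t)) false [] =
          cutLoopA string (r ++ '~' :: t) true [] by
        rw [cutLoopA, if_neg (by simp), if_pos (by simp)]]
    rw [pv_loopA_save string r hr t []]
    -- evaluate port B
    unfold cut_colour_code_alt
    simp only [hfind, hfrom]
    rw [if_neg (by omega), if_neg (by omega)]
    have htok : (PySem.Str.slice string (some ((p.length : Int) + 1))
        (some ((p.length : Int) + 1 + r.length))).toList = r := by
      rw [PySem.Str.toList_slice]
      have h1 : ((p.length : Int) + 1) = ((p.length + 1 : Nat) : Int) := by push_cast; ring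
      have h2 : ((p.length : Int) + 1 + r.length) = ((p.length + 1 + r.length : Nat) : Int) := by
        push_cast; ring
      rw [PySem.Chars.slice_eq_listSlice, h2, h1, PySem.List.slice_natCast, hpq, hdropA]
      have h3 : p.length + 1 + r.length - (p.length + 1) = r.length := by omega
      rw [h3]
      simp
    set token := PySem.Str.slice string (some ((p.length : Int) + 1))
        (some ((p.length : Int) + 1 + r.length)) with htokdef
    have hrep : ("~" ++ token ++ "~" : String) = String.ofList ('~' :: ([] ++ r) ++ ['~']) := by
      apply String.ext
      simp [htok]
    have hcol : PySem.Dict.getD pvColourTable (PySem.Str.lower token) (0, 0, 0)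
        = pvColourChainA (PySem.Chars.lower ([] ++ r)) := by
      rw [pv_chain_eq_dict, PySem.Str.toList_lower, htok]
      simp
    rw [hrep, hcol]
  · -- no '~' at all: both take the default branch
    have hfindC : PySem.Chars.find string.toList ['~'] = -1 :=
      (PySem.Chars.find_eq_neg_one_iff _ _).mpr (fun h => h0 (pv_singleton_infix.mp h))
    unfold cut_colour_code cut_colour_code_alt
    simp [hfindC]
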